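-- pv_equiv track=rewrite | github.com/sunilsoni/interview-notes-python | com/interview/2024/May/findNumOfPairs2.py | findNumOfPairs2
-- ===== SOURCE A (Python) =====
-- def findNumOfPairs2(a, b):
--     a.sort()
--     b.sort()
--     count = 0
--     i = j = 0
--     while i < len(a) and j < len(b):
--         if a[i] < b[j]:
--             count += 1
--             i += 1
--         j += 1
--     return count
-- ===== SOURCE B (Python) =====
-- def findNumOfPairs2(a, b):
--     a.sort()
--     b.sort()
--
--     def feasible(c):
--         # the c smallest a's can beat the c largest b's in order
--         return all(a[i] < b[len(b) - c + i] for i in range(c))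
--
--     lo, hi = 0, min(len(a), len(b))
--     while lo < hi:
--         mid = (lo + hi + 1) // 2
--         if feasible(mid):
--             lo = mid
--         else:
--             hi = mid - 1
--     return lo
-- ===== Notes on version B (the rewrite author's own statement) =====
-- stated objective: alternative
-- what changed: Replaces the two-pointer greedy merge with binary search on the answer c, checking feasibility (the c smallest a's beat the c largest b's in order) per candidate; both keep the in-place sorts.
import Mathlib
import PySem

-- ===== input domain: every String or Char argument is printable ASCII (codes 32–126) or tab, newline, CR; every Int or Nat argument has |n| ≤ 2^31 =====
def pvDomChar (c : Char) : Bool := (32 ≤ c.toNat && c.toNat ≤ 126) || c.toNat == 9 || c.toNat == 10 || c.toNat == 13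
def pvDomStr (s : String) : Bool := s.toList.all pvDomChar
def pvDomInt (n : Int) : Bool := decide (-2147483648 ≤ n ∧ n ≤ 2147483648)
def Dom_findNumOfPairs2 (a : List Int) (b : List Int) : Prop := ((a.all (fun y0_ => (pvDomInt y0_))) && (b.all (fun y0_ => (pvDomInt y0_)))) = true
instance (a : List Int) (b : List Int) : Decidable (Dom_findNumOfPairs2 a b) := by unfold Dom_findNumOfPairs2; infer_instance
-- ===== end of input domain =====

-- B replaces A's two-pointer greedy merge by a binary search on the answer with a
-- feasibility check (alternative algorithm, same asymptotic cost); both versions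
-- sort their list ARGUMENTS in place in Python — the equivalence proved here is
-- about the return value (the mutation is identical in A and B).

-- ===== PORT A =====
-- the while loop: state (count, i, j); i,j only move forward while in range
def pvALoop (sa sb : List Int) (count i j : Nat) : Nat :=
  if h : i < sa.length ∧ j < sb.length then
    if sa.getD i 0 < sb.getD j 0 then pvALoop sa sb (count + 1) (i + 1) (j + 1)
    else pvALoop sa sb count i (j + 1)
  else count
termination_by sb.length - j
decreasing_by all_goals omega

def findNumOfPairs2 (a : List Int) (b : List Int) : Int :=
  let sa := PySem.List.sorted a (fun x => x) false
  let sb := PySem.List.sorted b (fun x => x) false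
  (pvALoop sa sb 0 0 0 : Int)

-- ===== PORT B =====
-- feasible(c): all(sa[i] < sb[len(sb)-c+i] for i in range(c))
def pvFeasible (sa sb : List Int) (c : Nat) : Bool :=
  (List.range c).all (fun i => decide (sa.getD i 0 < sb.getD (sb.length - c + i) 0))

-- the binary-search loop on the answer: while lo < hi: mid = (lo+hi+1)//2; …
def pvBSearch (sa sb : List Int) (lo hi : Nat) : Nat :=
  if h : lo < hi then
    if pvFeasible sa sb ((lo + hi + 1) / 2) then pvBSearch sa sb ((lo + hi + 1) / 2) hi
    else pvBSearch sa sb lo ((lo + hi + 1) / 2 - 1)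
  else lo
termination_by hi - lo
decreasing_by all_goals omega

def findNumOfPairs2_alt (a : List Int) (b : List Int) : Int :=
  let sa := PySem.List.sorted a (fun x => x) false
  let sb := PySem.List.sorted b (fun x => x) false
  (pvBSearch sa sb 0 (min sa.length sb.length) : Int)

-- ===== PRECONDITION & SPEC =====
def Spec_findNumOfPairs2 (a : List Int) (b : List Int) (out : Int) : Prop := out = findNumOfPairs2_alt a b
instance (a : List Int) (b : List Int) (out : Int) : Decidable (Spec_findNumOfPairs2 a b out) := by unfold Spec_findNumOfPairs2; infer_instance

-- ===== CLAIM (what is proved, stated in full; the proofs are below) =====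
def Claim_equal_findNumOfPairs2 : Prop := ∀ (a : List Int) (b : List Int), Dom_findNumOfPairs2 a b → Spec_findNumOfPairs2 a b (findNumOfPairs2 a b)

-- ===== LEMMAS AND PROOFS =====

-- reference greedy on lists (proof device: pvALoop computes this)
def pvG : List Int → List Int → Nat
  | _, [] => 0
  | [], _ :: _ => 0
  | x :: xs, y :: ys => if x < y then pvG xs ys + 1 else pvG (x :: xs) ys

theorem pvG_nil_right (u : List Int) : pvG u [] = 0 := by cases u <;> rfl

theorem pvG_le : ∀ (u v : List Int), pvG u v ≤ min u.length v.length := by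
  intro u v
  induction v generalizing u with
  | nil => simp [pvG_nil_right]
  | cons y ys ih =>
    cases u with
    | nil => simp [pvG]
    | cons x xs =>
      by_cases hxy : x < y
      · have := ih xs
        simp only [pvG, if_pos hxy, List.length_cons]
        omega
      · have := ih (x :: xs)
        simp only [pvG, if_neg hxy, List.length_cons] at *
        omega

theorem pvALoop_eq_pvG (sa sb : List Int) :
    ∀ (k j count i : Nat), sb.length - j ≤ k →
      pvALoop sa sb count i j = count + pvG (sa.drop i) (sb.drop j) := by
  intro k
  induction k with
  | zero =>
    intro j count i hk
    rw [pvALoop]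
    have hj : sb.length ≤ j := by omega
    rw [List.drop_eq_nil_of_le hj, pvG_nil_right]
    rw [dif_neg (by omega)]
    omega
  | succ k ih =>
    intro j count i hk
    rw [pvALoop]
    by_cases h : i < sa.length ∧ j < sb.length
    · obtain ⟨hi, hj⟩ := h
      rw [dif_pos ⟨hi, hj⟩]
      rw [List.drop_eq_getElem_cons hi, List.drop_eq_getElem_cons hj]
      rw [List.getD_eq_getElem sa 0 hi, List.getD_eq_getElem sb 0 hj]
      by_cases hlt : sa[i] < sb[j]
      · rw [if_pos hlt]
        rw [ih (j + 1) (count + 1) (i + 1) (by omega)]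
        simp only [pvG, if_pos hlt]
        omega
      · rw [if_neg hlt]
        rw [ih (j + 1) count i (by omega)]
        rw [List.drop_eq_getElem_cons hi]
        simp only [pvG, if_neg hlt]
    · rw [dif_neg h]
      rcases Nat.lt_or_ge j sb.length with hj | hj
      · have hi : sa.length ≤ i := by omega
        rw [List.drop_eq_nil_of_le hi]
        rw [List.drop_eq_getElem_cons hj]
        simp [pvG]
      · rw [List.drop_eq_nil_of_le hj, pvG_nil_right]
        omega

theorem pvFeasible_eq_forall (sa sb : List Int) (c : Nat) :
    pvFeasible sa sb c = true ↔
      ∀ i < c, sa.getD i 0 < sb.getD (sb.length - c + i) 0 := by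
  simp [pvFeasible, List.all_eq_true, List.mem_range]

-- feasibility in list form
theorem pvFeasible_iff (sa sb : List Int) (c : Nat) (hca : c ≤ sa.length) (hcb : c ≤ sb.length) :
    pvFeasible sa sb c = true ↔
      List.Forall₂ (· < ·) (sa.take c) (sb.drop (sb.length - c)) := by
  have hlen1 : (sa.take c).length = c := by simp; omega
  have hlen2 : (sb.drop (sb.length - c)).length = c := by simp; omega
  rw [pvFeasible_eq_forall, List.forall₂_iff_get]
  constructor
  · intro H
    refine ⟨by rw [hlen1, hlen2], ?_⟩
    intro i h1 h2
    have hi : i < c := by rw [hlen1] at h1; exact h1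
    simp only [List.get_eq_getElem, List.getElem_take, List.getElem_drop]
    have := H i hi
    rw [List.getD_eq_getElem sa 0 (by omega), List.getD_eq_getElem sb 0 (by omega)] at this
    exact this
  · intro H i hi
    have h1 : i < (sa.take c).length := by rw [hlen1]; exact hi
    have h2 : i < (sb.drop (sb.length - c)).length := by rw [hlen2]; exact hi
    have := H.2 i h1 h2
    simp only [List.get_eq_getElem, List.getElem_take, List.getElem_drop] at this
    rw [List.getD_eq_getElem sa 0 (by omega), List.getD_eq_getElem sb 0 (by omega)]
    exact this

-- antitone step: needs only that sb is position-wise monotone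
theorem pvFeasible_antitone (sa sb : List Int)
    (hmono : ∀ p q : Nat, p ≤ q → q < sb.length → sb.getD p 0 ≤ sb.getD q 0)
    (c : Nat) (hc : c + 1 ≤ sb.length) :
    pvFeasible sa sb (c + 1) = true → pvFeasible sa sb c = true := by
  rw [pvFeasible_eq_forall, pvFeasible_eq_forall]
  intro H i hi
  have h1 := H i (by omega)
  have h2 := hmono (sb.length - (c + 1) + i) (sb.length - c + i) (by omega) (by omega)
  exact lt_of_lt_of_le h1 h2

theorem pvFeasible_mono_le (sa sb : List Int)
    (hmono : ∀ p q : Nat, p ≤ q → q < sb.length → sb.getD p 0 ≤ sb.getD q 0) :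
    ∀ (d c : Nat), c ≤ d → d ≤ sb.length →
      pvFeasible sa sb d = true → pvFeasible sa sb c = true := by
  intro d
  induction d with
  | zero =>
    intro c hc _ h
    have hc0 : c = 0 := by omega
    subst hc0
    exact h
  | succ d ih =>
    intro c hc hd h
    rcases Nat.lt_or_ge c (d + 1) with hlt | hge
    · exact ih c (by omega) (by omega) (pvFeasible_antitone sa sb hmono d hd h)
    · have hc1 : c = d + 1 := by omega
      subst hc1
      exact h

-- the greedy result is feasible (needs sb sorted)
theorem pvG_feas : ∀ (u v : List Int), v.Pairwise (· ≤ ·) →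
    List.Forall₂ (· < ·) (u.take (pvG u v)) (v.drop (v.length - pvG u v)) := by
  intro u v
  induction v generalizing u with
  | nil => intro _; simp [pvG_nil_right]
  | cons y ys ih =>
    intro hp
    have hyle : ∀ z ∈ ys, y ≤ z := (List.pairwise_cons.mp hp).1
    have hys : ys.Pairwise (· ≤ ·) := (List.pairwise_cons.mp hp).2
    cases u with
    | nil => simp [pvG]
    | cons x xs =>
      by_cases hxy : x < y
      · have hg' : pvG xs ys ≤ min xs.length ys.length := pvG_le xs ys
        have hIH := ih xs hys
        simp only [pvG, if_pos hxy]
        rcases Nat.lt_or_ge (pvG xs ys) ys.length with hlt | hge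
        · have hk : ys.length - pvG xs ys - 1 < ys.length := by omega
          have hdrop : (y :: ys).drop ((y :: ys).length - (pvG xs ys + 1)) =
              ys[ys.length - pvG xs ys - 1] :: ys.drop (ys.length - pvG xs ys) := by
            have h1 : (y :: ys).length - (pvG xs ys + 1) = (ys.length - pvG xs ys - 1) + 1 := by
              simp only [List.length_cons]; omega
            have h2 : ys.length - pvG xs ys - 1 + 1 = ys.length - pvG xs ys := by omega
            rw [h1, List.drop_succ_cons, List.drop_eq_getElem_cons hk, h2]
          rw [hdrop, List.take_succ_cons]
          exact List.Forall₂.cons (lt_of_lt_of_le hxy (hyle _ (List.getElem_mem hk))) hIH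
        · have h1 : (y :: ys).length - (pvG xs ys + 1) = 0 := by
            simp only [List.length_cons]; omega
          rw [h1, List.drop_zero, List.take_succ_cons]
          refine List.Forall₂.cons hxy ?_
          have h2 : ys.length - pvG xs ys = 0 := by omega
          rw [h2, List.drop_zero] at hIH
          exact hIH
      · simp only [pvG, if_neg hxy]
        have hg := pvG_le (x :: xs) ys
        have h1 : (y :: ys).length - pvG (x :: xs) ys = (ys.length - pvG (x :: xs) ys) + 1 := by
          simp only [List.length_cons]
          have := pvG_le (x :: xs) ys
          omega
        rw [h1, List.drop_succ_cons]
        exact ih (x :: xs) hys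

-- one more than the greedy result is infeasible
theorem pvG_not_feas : ∀ (u v : List Int),
    pvG u v + 1 ≤ u.length → pvG u v + 1 ≤ v.length →
    ¬ List.Forall₂ (· < ·) (u.take (pvG u v + 1)) (v.drop (v.length - (pvG u v + 1))) := by
  intro u v
  induction v generalizing u with
  | nil => intro _ hb; simp at hb
  | cons y ys ih =>
    intro ha hb
    cases u with
    | nil => simp [pvG] at ha
    | cons x xs =>
      by_cases hxy : x < y
      · simp only [pvG, if_pos hxy, List.length_cons] at ha hb ⊢
        have ha' : pvG xs ys + 1 ≤ xs.length := by omega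
        have hb' : pvG xs ys + 1 ≤ ys.length := by omega
        intro F
        apply ih xs ha' hb'
        rcases Nat.lt_or_ge (pvG xs ys + 1) ys.length with hlt | hge
        · have hk : ys.length - (pvG xs ys + 1) - 1 < ys.length := by omega
          have h1 : ys.length + 1 - (pvG xs ys + 1 + 1) =
              (ys.length - (pvG xs ys + 1) - 1) + 1 := by omega
          rw [h1, List.take_succ_cons, List.drop_succ_cons,
            List.drop_eq_getElem_cons hk] at F
          cases F with
          | cons _ Ftail =>
            have h2 : ys.length - (pvG xs ys + 1) - 1 + 1 = ys.length - (pvG xs ys + 1) := by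
              omega
            rwa [h2] at Ftail
        · have h1 : ys.length + 1 - (pvG xs ys + 1 + 1) = 0 := by omega
          rw [h1, List.drop_zero, List.take_succ_cons] at F
          cases F with
          | cons _ Ftail =>
            have h2 : ys.length - (pvG xs ys + 1) = 0 := by omega
            rw [h2, List.drop_zero]
            exact Ftail
      · simp only [pvG, if_neg hxy, List.length_cons] at ha hb ⊢
        intro F
        rcases Nat.lt_or_ge (pvG (x :: xs) ys + 1) (ys.length + 1) with hlt | hge
        · have hb' : pvG (x :: xs) ys + 1 ≤ ys.length := by omega
          apply ih (x :: xs) (by simpa using ha) hb'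
          have h1 : ys.length + 1 - (pvG (x :: xs) ys + 1) =
              (ys.length - (pvG (x :: xs) ys + 1)) + 1 := by omega
          rwa [h1, List.drop_succ_cons] at F
        · have h1 : ys.length + 1 - (pvG (x :: xs) ys + 1) = 0 := by omega
          rw [h1, List.drop_zero, List.take_succ_cons] at F
          cases F with
          | cons hhead _ => exact hxy hhead

-- feasibility ≡ (c ≤ greedy result), for c within range
theorem pvFeasible_iff_le (sa sb : List Int)
    (hmono : ∀ p q : Nat, p ≤ q → q < sb.length → sb.getD p 0 ≤ sb.getD q 0)
    (hp : sb.Pairwise (· ≤ ·)) (c : Nat) (hc : c ≤ min sa.length sb.length) :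
    (pvFeasible sa sb c = true ↔ c ≤ pvG sa sb) := by
  have hg := pvG_le sa sb
  constructor
  · intro hfeas
    by_contra hgt
    have hc1 : pvG sa sb + 1 ≤ c := by omega
    have hf1 : pvFeasible sa sb (pvG sa sb + 1) = true :=
      pvFeasible_mono_le sa sb hmono c (pvG sa sb + 1) hc1 (by omega) hfeas
    exact pvG_not_feas sa sb (by omega) (by omega)
      ((pvFeasible_iff sa sb _ (by omega) (by omega)).mp hf1)
  · intro hle
    have hfg : pvFeasible sa sb (pvG sa sb) = true :=
      (pvFeasible_iff sa sb _ (by omega) (by omega)).mpr (pvG_feas sa sb hp)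
    exact pvFeasible_mono_le sa sb hmono (pvG sa sb) c hle (by omega) hfg

-- binary-search correctness against a threshold predicate
theorem pvBSearch_eq (sa sb : List Int) (g hi0 : Nat)
    (H : ∀ c, c ≤ hi0 → (pvFeasible sa sb c = true ↔ c ≤ g)) :
    ∀ (k lo hi : Nat), hi - lo ≤ k → hi ≤ hi0 → lo ≤ g → g ≤ hi →
      pvBSearch sa sb lo hi = g := by
  intro k
  induction k with
  | zero =>
    intro lo hi hk hhi hlo hg
    rw [pvBSearch, dif_neg (by omega : ¬ lo < hi)]
    omega
  | succ k ih =>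
    intro lo hi hk hhi hlo hg
    rw [pvBSearch]
    by_cases h : lo < hi
    · rw [dif_pos h]
      have hmid1 : lo < (lo + hi + 1) / 2 := by omega
      have hmid2 : (lo + hi + 1) / 2 ≤ hi := by omega
      by_cases hf : pvFeasible sa sb ((lo + hi + 1) / 2) = true
      · rw [if_pos hf]
        have : (lo + hi + 1) / 2 ≤ g := (H _ (by omega)).mp hf
        exact ih _ _ (by omega) hhi this hg
      · rw [if_neg hf]
        have : ¬ ((lo + hi + 1) / 2 ≤ g) := fun hle => hf ((H _ (by omega)).mpr hle)
        exact ih _ _ (by omega) (by omega) hlo (by omega)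
    · rw [dif_neg h]
      omega

-- ===== VERDICT (by name: the statement is the Claim_ definition above) =====
theorem findNumOfPairs2_spec : Claim_equal_findNumOfPairs2 := by
  intro a b _
  unfold Spec_findNumOfPairs2 findNumOfPairs2 findNumOfPairs2_alt
  set sa := PySem.List.sorted a (fun x => x) false with hsa
  set sb := PySem.List.sorted b (fun x => x) false with hsb
  have hmono : ∀ p q : Nat, p ≤ q → q < sb.length → sb.getD p 0 ≤ sb.getD q 0 := by
    intro p q hpq hq
    rw [List.getD_eq_getElem sb 0 (by omega), List.getD_eq_getElem sb 0 hq]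
    exact PySem.List.sorted_id_getElem_mono b hpq hq
  have hp : sb.Pairwise (· ≤ ·) := PySem.List.sorted_pairwise b (fun x => x)
  have hA : pvALoop sa sb 0 0 0 = pvG sa sb := by
    have := pvALoop_eq_pvG sa sb sb.length 0 0 0 (by omega)
    simpa using this
  have hB : pvBSearch sa sb 0 (min sa.length sb.length) = pvG sa sb := by
    have hg := pvG_le sa sb
    exact pvBSearch_eq sa sb (pvG sa sb) (min sa.length sb.length)
      (fun c hc => pvFeasible_iff_le sa sb hmono hp c hc)
      (min sa.length sb.length) 0 (min sa.length sb.length)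
      (by omega) (by omega) (by omega) hg
  show (↑(pvALoop sa sb 0 0 0) : Int) = ↑(pvBSearch sa sb 0 (min sa.length sb.length))
  rw [hA, hB]
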